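-- pv_equiv track=rewrite | github.com/nimpa3201/ProblemSolved | programmers/12987.py | solution
-- ===== SOURCE A (Python) =====
-- import heapq
--
-- def solution(A, B):
--     heapq.heapify(A) # 주어짐
--     heapq.heapify(B)
--
--     ans =0
--
--     while A :
--
--         elemA = heapq.heappop(A)
--
--         while B and B[0] <=elemA:
--             heapq.heappop(B)
--
--         if B :
--             heapq.heappop(B)
--             ans +=1
--
--     return ans
-- ===== SOURCE B (Python) =====
-- def solution(A, B):
--     # Binary search on the answer: k matches are possible iff the k smallest
--     # elements of A are beaten elementwise by the k largest elements of B.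
--     sa = sorted(A)
--     sb = sorted(B)
--     n, m = len(sa), len(sb)
--
--     def ok(k):
--         return all(sa[i] < sb[m - k + i] for i in range(k))
--
--     lo, hi = 0, min(n, m)
--     while lo < hi:
--         mid = (lo + hi + 1) // 2
--         if ok(mid):
--             lo = mid
--         else:
--             hi = mid - 1
--     return lo
-- ===== Notes on version B (the rewrite author's own statement) =====
-- stated objective: alternative
-- what changed: Replaces A's greedy heap-based matching (repeated extract-min with an inner skip loop) by binary search on the answer k, using the decision criterion that k matches exist iff the k smallest of A are elementwise beaten by the k largest of B; B also does not mutate its arguments (A empties/reorders them in place).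
import Mathlib
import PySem

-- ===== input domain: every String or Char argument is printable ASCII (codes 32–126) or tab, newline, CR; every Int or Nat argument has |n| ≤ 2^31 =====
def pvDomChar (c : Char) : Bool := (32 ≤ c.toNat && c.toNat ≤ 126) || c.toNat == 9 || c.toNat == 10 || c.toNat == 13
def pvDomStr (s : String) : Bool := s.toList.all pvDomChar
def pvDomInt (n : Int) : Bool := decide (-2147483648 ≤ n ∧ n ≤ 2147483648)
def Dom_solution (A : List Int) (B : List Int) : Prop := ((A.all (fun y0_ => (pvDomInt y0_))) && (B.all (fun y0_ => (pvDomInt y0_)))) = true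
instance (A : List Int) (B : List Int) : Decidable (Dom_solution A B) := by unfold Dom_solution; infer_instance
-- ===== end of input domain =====

-- B replaces A's greedy heap matching by binary search on the answer k (criterion: the k
-- smallest of A are elementwise beaten by the k largest of B); return values are proved
-- equal (Python A empties/reorders its arguments in place, B does not — the claim is
-- about the return value only).

-- ===== PORT A =====
-- heapq is modeled as a priority queue over the list's elements: heappop returns and
-- removes (the first occurrence of) the minimum, `B and B[0] <= x` reads the minimum,
-- heapify is the identity at this level; this is exact for the function's return value,
-- which only observes the sequence of popped minima.

-- helper for termination: the minimum read off a nonempty queue is one of its elements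
theorem minD_mem {l : List Int} (h : l ≠ []) : l.min?.getD 0 ∈ l := by
  cases hm : l.min? with
  | none => exact absurd (List.min?_eq_none_iff.mp hm) h
  | some m => simpa using List.min?_mem hm

-- inner loop `while B and B[0] <= elemA: heapq.heappop(B)`
def popLe (B : List Int) (a : Int) : List Int :=
  if _hB : B = [] then B
  else
    let m := B.min?.getD 0
    if m ≤ a then popLe (B.erase m) a else B
termination_by B.length
decreasing_by
  have hm := minD_mem _hB
  have hp : 0 < B.length := List.length_pos_of_mem hm
  rw [List.length_erase_of_mem hm]; omega

-- outer loop `while A: elemA = heappop(A); …; if B: heappop(B); ans += 1`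
def solGo (A B : List Int) : Int :=
  if hA : A = [] then 0
  else
    let a := A.min?.getD 0
    let B' := popLe B a
    if B' = [] then solGo (A.erase a) B'
    else 1 + solGo (A.erase a) (B'.erase (B'.min?.getD 0))
termination_by A.length
decreasing_by
  all_goals
    have hm := minD_mem hA
    have hp : 0 < A.length := List.length_pos_of_mem hm
    rw [List.length_erase_of_mem hm]; omega

def solution (A : List Int) (B : List Int) : Int := solGo A B

-- ===== PORT B =====
-- `ok(k)`: all(sa[i] < sb[m-k+i] for i in range(k)); during the search 0 ≤ k ≤ min(n,m),
-- so every index is in range and getD is exact for Python's indexing here.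
def feasOk (sa sb : List Int) (k : Nat) : Bool :=
  (List.range k).all (fun i => decide (sa.getD i 0 < sb.getD (sb.length - k + i) 0))

-- `while lo < hi: mid = (lo+hi+1)//2; lo/hi update`; the loop shrinks hi - lo each
-- iteration, so a fuel of hi - lo (structural recursion) runs it to completion exactly
def bsearch : Nat → List Int → List Int → Nat → Nat → Nat
  | 0, _, _, lo, _ => lo
  | fuel + 1, sa, sb, lo, hi =>
    if lo < hi then
      let mid := (lo + hi + 1) / 2
      if feasOk sa sb mid then bsearch fuel sa sb mid hi else bsearch fuel sa sb lo (mid - 1)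
    else lo

def solution_alt (A : List Int) (B : List Int) : Int :=
  let sa := PySem.List.sorted A (fun x => x) false
  let sb := PySem.List.sorted B (fun x => x) false
  (bsearch (min sa.length sb.length) sa sb 0 (min sa.length sb.length) : Int)

-- ===== PRECONDITION & SPEC =====
def Spec_solution (A : List Int) (B : List Int) (out : Int) : Prop := out = solution_alt A B
instance (A : List Int) (B : List Int) (out : Int) : Decidable (Spec_solution A B out) := by unfold Spec_solution; infer_instance

-- ===== CLAIM (what is proved, stated in full; the proofs are below) =====
def Claim_equal_solution : Prop := ∀ (A : List Int) (B : List Int), Dom_solution A B → Spec_solution A B (solution A B)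

-- ===== LEMMAS AND PROOFS =====

-- min? is invariant under permutation
theorem min?_perm {l l' : List Int} (h : l.Perm l') : l.min? = l'.min? := by
  cases hl : l.min? with
  | none =>
    rw [List.min?_eq_none_iff] at hl
    subst hl
    simp [h.symm.eq_nil]
  | some a =>
    rw [List.min?_eq_some_iff] at hl
    symm
    rw [List.min?_eq_some_iff]
    exact ⟨h.mem_iff.mp hl.1, fun b hb => hl.2 b (h.mem_iff.mpr hb)⟩

-- popLe respects permutation of its list argument
theorem popLe_perm (a : Int) : ∀ (n : Nat) (B B' : List Int), B.length ≤ n → B.Perm B' →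
    (popLe B a).Perm (popLe B' a) := by
  intro n
  induction n with
  | zero =>
    intro B B' hn h
    have hB : B = [] := List.eq_nil_of_length_eq_zero (Nat.le_zero.mp hn)
    subst hB
    rw [h.symm.eq_nil]
  | succ n ih =>
    intro B B' hn h
    rw [popLe, popLe]
    by_cases hB : B = []
    · subst hB; rw [h.symm.eq_nil]
    · have hB' : B' ≠ [] := fun hx => hB ((hx ▸ h).eq_nil)
      rw [dif_neg hB, dif_neg hB', min?_perm h]
      set m := B'.min?.getD 0 with hm
      by_cases hma : m ≤ a
      · rw [if_pos hma, if_pos hma]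
        have hmem : m ∈ B := h.mem_iff.mpr (minD_mem hB')
        have hlen : (B.erase m).length ≤ n := by
          have := List.length_pos_of_mem hmem
          rw [List.length_erase_of_mem hmem]; omega
        exact ih _ _ hlen (h.erase m)
      · rw [if_neg hma, if_neg hma]; exact h

-- solGo respects permutation of both arguments
theorem solGo_perm : ∀ (n : Nat) (A A' B B' : List Int), A.length ≤ n →
    A.Perm A' → B.Perm B' → solGo A B = solGo A' B' := by
  intro n
  induction n with
  | zero =>
    intro A A' B B' hn hA hB
    have h0 : A = [] := List.eq_nil_of_length_eq_zero (Nat.le_zero.mp hn)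
    subst h0
    rw [hA.symm.eq_nil, solGo, solGo]
    simp
  | succ n ih =>
    intro A A' B B' hn hA hB
    rw [solGo, solGo]
    by_cases hA0 : A = []
    · subst hA0; rw [hA.symm.eq_nil]; simp
    · have hA0' : A' ≠ [] := fun hx => hA0 ((hx ▸ hA).eq_nil)
      rw [dif_neg hA0, dif_neg hA0', min?_perm hA]
      set a := A'.min?.getD 0 with ha
      have hmem : a ∈ A := hA.mem_iff.mpr (minD_mem hA0')
      have hlen : (A.erase a).length ≤ n := by
        have := List.length_pos_of_mem hmem
        rw [List.length_erase_of_mem hmem]; omega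
      have hpop : (popLe B a).Perm (popLe B' a) :=
        popLe_perm a (max B.length B'.length) B B' (Nat.le_max_left _ _) hB
      by_cases hP : popLe B' a = []
      · have hPB0 : popLe B a = [] := (hP ▸ hpop).eq_nil
        rw [if_pos hP, if_pos hPB0]
        exact ih _ _ _ _ hlen (hA.erase a) hpop
      · have hPB : popLe B a ≠ [] := fun hx => hP ((hx ▸ hpop).symm.eq_nil)
        rw [if_neg hP, if_neg hPB, min?_perm hpop]
        rw [ih _ _ _ _ hlen (hA.erase a) (hpop.erase _)]

-- the minimum of a ≤-sorted nonempty list is its head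
theorem minD_sorted_cons {a : Int} {t : List Int} (h : (a :: t).Pairwise (· ≤ ·)) :
    (a :: t).min?.getD 0 = a := by
  have : (a :: t).min? = some a := by
    rw [List.min?_eq_some_iff]
    refine ⟨List.mem_cons_self, ?_⟩
    intro b hb
    rcases List.mem_cons.mp hb with rfl | hb
    · exact le_refl _
    · exact (List.pairwise_cons.mp h).1 b hb
  rw [this]; rfl

-- on a sorted list, the inner pop-while loop is dropWhile (· ≤ a)
theorem popLe_sorted (a : Int) : ∀ (S : List Int), S.Pairwise (· ≤ ·) →
    popLe S a = S.dropWhile (fun b => decide (b ≤ a)) := by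
  intro S
  induction S with
  | nil => intro _; rw [popLe]; rfl
  | cons s t ih =>
    intro hs
    rw [popLe, dif_neg (List.cons_ne_nil s t), minD_sorted_cons hs]
    by_cases hsa : s ≤ a
    · rw [if_pos hsa, List.erase_cons_head]
      rw [ih (List.pairwise_cons.mp hs).2, List.dropWhile_cons]
      simp [hsa]
    · rw [if_neg hsa, List.dropWhile_cons]
      simp [hsa]

-- the sorted-list greedy A computes, as a Nat count
def gN : List Int → List Int → Nat
  | [], _ => 0
  | a :: as, bs =>
    match bs.dropWhile (fun b => decide (b ≤ a)) with
    | [] => gN as []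
    | _ :: bs' => 1 + gN as bs'

theorem gN_nil : ∀ (as : List Int), gN as [] = 0 := by
  intro as
  induction as with
  | nil => rfl
  | cons a as ih => simp [gN, ih]

theorem solGo_sorted_eq : ∀ (S T : List Int), S.Pairwise (· ≤ ·) → T.Pairwise (· ≤ ·) →
    solGo S T = (gN S T : Int) := by
  intro S
  induction S with
  | nil => intro T _ _; rw [solGo]; rfl
  | cons a as ih =>
    intro T hS hT
    have has : as.Pairwise (· ≤ ·) := (List.pairwise_cons.mp hS).2
    rw [solGo]
    simp only [dif_neg (List.cons_ne_nil a as), minD_sorted_cons hS, List.erase_cons_head,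
      popLe_sorted a T hT]
    have hT' : (T.dropWhile (fun b => decide (b ≤ a))).Pairwise (· ≤ ·) :=
      hT.sublist (List.dropWhile_sublist _)
    cases hd : T.dropWhile (fun b => decide (b ≤ a)) with
    | nil =>
      rw [if_pos rfl]
      simp only [gN, hd]
      exact ih [] has List.Pairwise.nil
    | cons b bs' =>
      rw [hd] at hT'
      rw [if_neg (List.cons_ne_nil b bs'), minD_sorted_cons hT', List.erase_cons_head]
      simp only [gN, hd]
      rw [ih bs' has (List.pairwise_cons.mp hT').2]
      push_cast
      ring

-- feasibility of k matches: the k smallest of sa beaten by the k largest of sb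
def goodK (sa sb : List Int) (k : Nat) : Prop :=
  k ≤ sa.length ∧ k ≤ sb.length ∧
    ∀ i, i < k → sa.getD i 0 < sb.getD (sb.length - k + i) 0

-- the head of a nonempty dropWhile fails the predicate
theorem dropWhile_head_false {p : Int → Bool} : ∀ (l : List Int) {b : Int} {bs : List Int},
    l.dropWhile p = b :: bs → p b = false := by
  intro l
  induction l with
  | nil => intro b bs h; simp at h
  | cons x t ih =>
    intro b bs h
    rw [List.dropWhile_cons] at h
    by_cases hp : p x = true
    · rw [if_pos hp] at h; exact ih h
    · rw [if_neg hp] at h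
      cases h
      simpa using hp

-- getD over an append, right part
theorem getD_append_right_len : ∀ (P l : List Int) (r : Nat),
    (P ++ l).getD (P.length + r) 0 = l.getD r 0 := by
  intro P
  induction P with
  | nil => intro l r; simp
  | cons p P ih =>
    intro l r
    have h : (p :: P).length + r = (P.length + r) + 1 := by simp; omega
    rw [List.cons_append, h, List.getD_cons_succ, ih]

-- getD over an append, left part
theorem getD_append_left_len : ∀ (P l : List Int) (i : Nat), i < P.length →
    (P ++ l).getD i 0 = P.getD i 0 := by
  intro P
  induction P with
  | nil => intro l i hi; simp at hi
  | cons p P ih =>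
    intro l i hi
    cases i with
    | zero => simp
    | succ j =>
      rw [List.cons_append, List.getD_cons_succ, List.getD_cons_succ]
      exact ih l j (by simpa using hi)

-- a getD at an in-range index is a member
theorem getD_mem {l : List Int} {i : Nat} (h : i < l.length) : l.getD i 0 ∈ l := by
  rw [List.getD_eq_getElem l 0 h]
  exact List.getElem_mem h

-- the greedy count is feasible
theorem gN_good : ∀ (sa sb : List Int), sb.Pairwise (· ≤ ·) → goodK sa sb (gN sa sb) := by
  intro sa
  induction sa with
  | nil =>
    intro sb _
    refine ⟨Nat.zero_le _, Nat.zero_le _, ?_⟩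
    intro i hi
    simp [gN] at hi
  | cons a as ih =>
    intro sb hsb
    cases hd : sb.dropWhile (fun b => decide (b ≤ a)) with
    | nil =>
      simp only [gN, hd, gN_nil]
      refine ⟨Nat.zero_le _, Nat.zero_le _, ?_⟩
      intro i hi
      omega
    | cons b bs' =>
      simp only [gN, hd]
      have hD : (sb.dropWhile (fun b => decide (b ≤ a))).Pairwise (· ≤ ·) :=
        hsb.sublist (List.dropWhile_sublist _)
      rw [hd] at hD
      obtain ⟨hb_all, hbs'⟩ := List.pairwise_cons.mp hD
      have hsplit : sb.takeWhile (fun b => decide (b ≤ a)) ++ b :: bs' = sb := by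
        rw [← hd]; exact List.takeWhile_append_dropWhile
      set P := sb.takeWhile (fun b => decide (b ≤ a)) with hPdef
      have hm : sb.length = P.length + (bs'.length + 1) := by
        rw [← hsplit]; simp [List.length_append]
      have hba : a < b := by
        have := dropWhile_head_false sb hd
        simpa using this
      obtain ⟨hk1, hk2, hk3⟩ := ih bs' hbs'
      set k := gN as bs' with hkdef
      have hlcons : (a :: as).length = as.length + 1 := by simp
      refine ⟨by omega, by omega, ?_⟩
      intro i hi
      cases i with
      | zero =>
        -- a < sb[m - (1+k)]; that element lies in b :: bs', hence ≥ b > a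
        have hq : sb.length - (1 + k) + 0 = P.length + (bs'.length - k) := by omega
        rw [List.getD_cons_zero, hq, ← hsplit, getD_append_right_len]
        have hrlt : bs'.length - k < (b :: bs').length := by simp
        have hget := getD_mem hrlt
        have hge : b ≤ (b :: bs').getD (bs'.length - k) 0 := by
          rcases List.mem_cons.mp hget with he | he
          · exact le_of_eq he.symm
          · exact hb_all _ he
        omega
      | succ j =>
        have hj : j < k := by omega
        have h1 := hk3 j hj
        have hpos : sb.length - (1 + k) + (j + 1) = P.length + ((bs'.length - k + j) + 1) := by
          omega
        rw [List.getD_cons_succ, hpos, ← hsplit, getD_append_right_len, List.getD_cons_succ]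
        exact h1

-- the greedy count dominates every feasible k
theorem good_le_gN : ∀ (sa sb : List Int) (k : Nat), goodK sa sb k → k ≤ gN sa sb := by
  intro sa
  induction sa with
  | nil => intro sb k hk; simpa [gN] using hk.1
  | cons a as ih =>
    intro sb k hk
    obtain ⟨hk1, hk2, hk3⟩ := hk
    cases hd : sb.dropWhile (fun b => decide (b ≤ a)) with
    | nil =>
      simp only [gN, hd, gN_nil]
      by_contra hpos
      have hk0 : 1 ≤ k := by omega
      have hall : ∀ x ∈ sb, x ≤ a := by
        intro x hx
        have := (List.dropWhile_eq_nil_iff.mp hd) x hx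
        simpa using this
      have hlt : sb.length - k + 0 < sb.length := by omega
      have h0 := hk3 0 hk0
      rw [List.getD_cons_zero] at h0
      have := hall _ (getD_mem hlt)
      omega
    | cons b bs' =>
      simp only [gN, hd]
      cases k with
      | zero => omega
      | succ k' =>
        have hsplit : sb.takeWhile (fun b => decide (b ≤ a)) ++ b :: bs' = sb := by
          rw [← hd]; exact List.takeWhile_append_dropWhile
        set P := sb.takeWhile (fun b => decide (b ≤ a)) with hPdef
        have hm : sb.length = P.length + (bs'.length + 1) := by
          rw [← hsplit]; simp [List.length_append]
        have hP_le : ∀ x ∈ P, x ≤ a := by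
          intro x hx
          have := List.mem_takeWhile_imp hx
          simpa using this
        have hlcons : (a :: as).length = as.length + 1 := by simp
        -- k' ≤ bs'.length: otherwise sb[m - (k'+1)] lies in P, contradicting a < it
        have hk'm : k' ≤ bs'.length := by
          by_contra hgt
          have h0 := hk3 0 (by omega)
          rw [List.getD_cons_zero] at h0
          set i0 := sb.length - (k' + 1) + 0 with hi0
          have hq : i0 < P.length := by omega
          rw [← hsplit, getD_append_left_len _ _ _ hq] at h0
          have := hP_le _ (getD_mem hq)
          omega
        have hrec : k' ≤ gN as bs' := by
          apply ih bs' k'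
          refine ⟨by omega, hk'm, ?_⟩
          intro j hj
          have h1 := hk3 (j + 1) (by omega)
          have hpos : sb.length - (k' + 1) + (j + 1) = P.length + ((bs'.length - k' + j) + 1) := by
            omega
          rw [List.getD_cons_succ] at h1
          rw [hpos, ← hsplit, getD_append_right_len, List.getD_cons_succ] at h1
          exact h1
        omega

-- feasOk unfolded
theorem feasOk_iff (sa sb : List Int) (k : Nat) :
    feasOk sa sb k = true ↔ ∀ i, i < k → sa.getD i 0 < sb.getD (sb.length - k + i) 0 := by
  simp [feasOk]

-- in a sorted list, values are monotone in the index
theorem sorted_getElem_le {sb : List Int} (hsb : sb.Pairwise (· ≤ ·)) (p q : Nat)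
    (hq : q < sb.length) (hpq : p ≤ q) : sb.getD p 0 ≤ sb.getD q 0 := by
  have hp : p < sb.length := by omega
  rw [List.getD_eq_getElem sb 0 hp, List.getD_eq_getElem sb 0 hq]
  rcases Nat.lt_or_ge p q with h | h
  · exact (List.pairwise_iff_getElem.mp hsb) p q hp hq h
  · have : p = q := by omega
    subst this
    rfl

-- feasibility is downward closed (for k within range)
theorem feasOk_mono {sa sb : List Int} (hsb : sb.Pairwise (· ≤ ·)) (j k : Nat)
    (hjk : j ≤ k) (hk : k ≤ sb.length) (h : feasOk sa sb k = true) : feasOk sa sb j = true := by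
  rw [feasOk_iff] at h ⊢
  intro i hi
  have h1 := h i (by omega)
  have h2 : sb.getD (sb.length - k + i) 0 ≤ sb.getD (sb.length - j + i) 0 :=
    sorted_getElem_le hsb _ _ (by omega) (by omega)
  omega

-- the binary search finds the maximum feasible value
theorem bsearch_eq (sa sb : List Int) : ∀ (fuel lo hi t : Nat), hi - lo ≤ fuel →
    lo ≤ t → t ≤ hi → feasOk sa sb t = true →
    (∀ k, k ≤ hi → feasOk sa sb k = true → k ≤ t) →
    (∀ j k, j ≤ k → k ≤ hi → feasOk sa sb k = true → feasOk sa sb j = true) →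
    bsearch fuel sa sb lo hi = t := by
  intro fuel
  induction fuel with
  | zero =>
    intro lo hi t hf h1 h2 _ _ _
    rw [bsearch]
    omega
  | succ fuel ih =>
    intro lo hi t hf h1 h2 ht hmax hmono
    rw [bsearch]
    by_cases hlh : lo < hi
    · rw [if_pos hlh]
      by_cases hfm : feasOk sa sb ((lo + hi + 1) / 2) = true
      · rw [if_pos hfm]
        have hmidt : (lo + hi + 1) / 2 ≤ t := hmax _ (by omega) hfm
        exact ih _ _ _ (by omega) hmidt h2 ht hmax hmono
      · rw [if_neg hfm]
        have htm : t < (lo + hi + 1) / 2 := by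
          by_contra hge
          exact hfm (hmono _ t (by omega) h2 ht)
        exact ih _ _ _ (by omega) h1 (by omega) ht
          (fun k hk hfk => hmax k (by omega) hfk)
          (fun j k hj hk hfk => hmono j k hj (by omega) hfk)
    · rw [if_neg hlh]
      omega

-- ===== VERDICT (by name: the statement is the Claim_ definition above) =====
theorem solution_spec : Claim_equal_solution := by
  intro A B _
  unfold Spec_solution solution solution_alt
  have hsaP : (PySem.List.sorted A (fun x => x) false).Perm A := PySem.List.sorted_perm A _ _
  have hsbP : (PySem.List.sorted B (fun x => x) false).Perm B := PySem.List.sorted_perm B _ _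
  have hsa : (PySem.List.sorted A (fun x => x) false).Pairwise (· ≤ ·) :=
    PySem.List.sorted_pairwise A (fun x => x)
  have hsb : (PySem.List.sorted B (fun x => x) false).Pairwise (· ≤ ·) :=
    PySem.List.sorted_pairwise B (fun x => x)
  set sa := PySem.List.sorted A (fun x => x) false with hsadef
  set sb := PySem.List.sorted B (fun x => x) false with hsbdef
  rw [solGo_perm A.length A sa B sb le_rfl hsaP.symm hsbP.symm]
  rw [solGo_sorted_eq sa sb hsa hsb]
  obtain ⟨hg1, hg2, hg3⟩ := gN_good sa sb hsb
  have hfeas : feasOk sa sb (gN sa sb) = true := (feasOk_iff sa sb _).mpr hg3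
  have hbs : bsearch (min sa.length sb.length) sa sb 0 (min sa.length sb.length) = gN sa sb := by
    apply bsearch_eq sa sb (min sa.length sb.length) 0 _ _ (by omega) (Nat.zero_le _)
      (by omega) hfeas
    · intro k hk hfk
      exact good_le_gN sa sb k ⟨by omega, by omega, (feasOk_iff sa sb k).mp hfk⟩
    · intro j k hj hk hfk
      exact feasOk_mono hsb j k hj (by omega) hfk
  show (gN sa sb : Int) = ((bsearch (min sa.length sb.length) sa sb 0 (min sa.length sb.length) : Nat) : Int)
  rw [hbs]
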